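-- pv_equiv track=rewrite | github.com/dzieju/google-sheets | quadra_service.py | detect_dbf_field_name
-- ===== SOURCE A (Python) =====
-- from typing import List, Dict, Any, Optional, Union, Tuple
--
-- def detect_dbf_field_name(field_names: List[str], possible_names: List[str]) -> Optional[str]:
--     """
--     Detect field name from a list of possible alternatives (case-insensitive).
--
--     Args:
--         field_names: List of field names in DBF table
--         possible_names: List of possible field names to match
--
--     Returns:
--         First matching field name (original case) or None if not found
--
--     Examples:
--         >>> detect_dbf_field_name(['NUMER', 'STAWKA', 'DATA'], ['STAWKA', 'STAW', 'RATE'])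
--         'STAWKA'
--         >>> detect_dbf_field_name(['NUMER', 'RATE', 'DATA'], ['STAWKA', 'STAW', 'RATE'])
--         'RATE'
--     """
--     if not field_names or not possible_names:
--         return None
--
--     # Normalize field names for comparison (uppercase, trim)
--     normalized_fields = {name.upper().strip(): name for name in field_names}
--
--     # Check each possible name
--     for possible in possible_names:
--         normalized_possible = possible.upper().strip()
--         if normalized_possible in normalized_fields:
--             return normalized_fields[normalized_possible]
--
--     return None
-- ===== SOURCE B (Python) =====
-- def detect_dbf_field_name(field_names, possible_names):
--     """Return the field matching the highest-priority candidate name.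
--
--     Builds a priority index of the normalized candidates once, then makes a
--     single pass over field_names keeping the field with the lowest candidate
--     priority (first field wins on equal priority).
--     """
--     rank = {}
--     for i, p in enumerate(possible_names):
--         rank.setdefault(p.upper().strip(), i)
--     best = None
--     best_rank = len(possible_names)
--     for name in field_names:
--         r = rank.get(name.upper().strip())
--         if r is not None and r < best_rank:
--             best_rank = r
--             best = name
--     return best
-- ===== Notes on version B (the rewrite author's own statement) =====
-- stated objective: alternative
-- what changed: Instead of indexing fields by normalized name and probing each candidate in order, B builds a priority index of the normalized candidates and makes a single argmin pass over field_names keeping the field with the lowest candidate priority; Pre_ excludes inputs where two distinct field names share a normalized form that matches a candidate, on which A's dict-overwrite (last such field wins) vs B's first-field choice is an accidental tie-break.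
-- outside the precondition, e.g. on detect_dbf_field_name(['a', 'A'], ['a']): A returns 'A', B returns 'a'
import Mathlib
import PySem

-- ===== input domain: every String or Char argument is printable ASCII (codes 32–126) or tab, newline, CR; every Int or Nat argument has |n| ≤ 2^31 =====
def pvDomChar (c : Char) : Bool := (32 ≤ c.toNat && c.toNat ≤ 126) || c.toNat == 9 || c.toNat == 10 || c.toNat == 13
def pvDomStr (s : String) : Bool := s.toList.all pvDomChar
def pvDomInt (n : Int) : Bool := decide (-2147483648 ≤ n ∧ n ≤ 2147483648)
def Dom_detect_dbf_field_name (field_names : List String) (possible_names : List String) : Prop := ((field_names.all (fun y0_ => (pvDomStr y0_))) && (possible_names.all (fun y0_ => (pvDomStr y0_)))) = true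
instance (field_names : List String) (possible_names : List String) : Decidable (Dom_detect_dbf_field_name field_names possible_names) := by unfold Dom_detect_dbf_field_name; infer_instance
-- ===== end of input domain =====

-- B replaces A's normalized-fields dict probed per candidate by a priority index of the
-- candidates and a single argmin pass over field_names (alternative decomposition).

-- shared helper: name.upper().strip()
def pvNorm (s : String) : String := PySem.Str.strip (PySem.Str.upper s)

-- ===== PORT A =====
-- the 'for possible in possible_names' loop with early return
def pvLoopA (d : PySem.Dict String String) : List String → Option String
  | [] => none
  | possible :: rest =>
    let np := pvNorm possible
    if d.contains np then d.get? np else pvLoopA d rest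

def detect_dbf_field_name (field_names : List String) (possible_names : List String) : Option String :=
  if field_names = [] ∨ possible_names = [] then none
  else
    let normalized_fields :=
      field_names.foldl (fun d name => d.insert (pvNorm name) name) PySem.Dict.empty
    pvLoopA normalized_fields possible_names

-- ===== PORT B =====
-- the 'for name in field_names' loop; state = (best_rank, best)
def pvStepB (rank : PySem.Dict String Int) (st : Int × Option String) (name : String) : Int × Option String :=
  match rank.get? (pvNorm name) with
  | some r => if r < st.1 then (r, some name) else st
  | none => st

def detect_dbf_field_name_alt (field_names : List String) (possible_names : List String) : Option String :=
  let rank := (PySem.List.enumerate possible_names 0).foldl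
    (fun d q => d.setdefault (pvNorm q.2) q.1) PySem.Dict.empty
  (field_names.foldl (pvStepB rank) ((possible_names.length : Int), none)).2

-- ===== PRECONDITION & SPEC =====
-- Pre_ excludes inputs on which two DISTINCT field names share a normalized form that also
-- matches a candidate: there A's dict reinsertion keeps the LAST such field while B keeps
-- the FIRST, an accidental tie-break neither caller would specify.
def Pre_detect_dbf_field_name (field_names : List String) (possible_names : List String) : Prop :=
  field_names.Pairwise
    (fun f g => pvNorm f = pvNorm g → pvNorm f ∈ possible_names.map pvNorm → f = g)
instance (field_names : List String) (possible_names : List String) : Decidable (Pre_detect_dbf_field_name field_names possible_names) := by unfold Pre_detect_dbf_field_name; infer_instance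

def pvWitness_detect_dbf_field_name : List String × List String := (["NUMER", "STAWKA", "DATA"], ["stawka ", "RATE"])

def Spec_detect_dbf_field_name (field_names : List String) (possible_names : List String) (out : Option String) : Prop := out = detect_dbf_field_name_alt field_names possible_names
instance (field_names : List String) (possible_names : List String) (out : Option String) : Decidable (Spec_detect_dbf_field_name field_names possible_names out) := by unfold Spec_detect_dbf_field_name; infer_instance

-- ===== CLAIM (what is proved, stated in full; the proofs are below) =====
def Claim_equal_detect_dbf_field_name : Prop := ∀ (field_names : List String) (possible_names : List String), Dom_detect_dbf_field_name field_names possible_names → Pre_detect_dbf_field_name field_names possible_names → Spec_detect_dbf_field_name field_names possible_names (detect_dbf_field_name field_names possible_names)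

-- ===== LEMMAS AND PROOFS =====

-- reference function both ports are reduced to: first candidate with a match, first matching field
def pvSpec (fs : List String) : List String → Option String
  | [] => none
  | p :: rest =>
    match fs.find? (fun f => pvNorm f == pvNorm p) with
    | some f => some f
    | none => pvSpec fs rest

theorem pvSpec_nil_fields (ps : List String) : pvSpec [] ps = none := by
  induction ps with
  | nil => rfl
  | cons p rest ih => simp [pvSpec, ih]

-- ---- A side ----

-- A's dict lookup = last normalized match = find? on the reversed list
def pvLastMatch (np : String) (fs : List String) : Option String :=
  fs.foldl (fun m name => if pvNorm name == np then some name else m) none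

theorem pvDict_get_eq_lastMatch (fs : List String) (np : String) :
    (fs.foldl (fun d name => d.insert (pvNorm name) name) PySem.Dict.empty).get? np
      = pvLastMatch np fs := by
  induction fs using List.reverseRecOn with
  | nil => simp [pvLastMatch, PySem.Dict.get?_empty]
  | append_singleton l x ih =>
    simp only [List.foldl_append, List.foldl_cons, List.foldl_nil, pvLastMatch] at *
    rw [PySem.Dict.get?_insert]
    by_cases h : np = pvNorm x
    · simp [h]
    · simp [h, Ne.symm h, ih]

theorem pvLastMatch_eq_find_reverse (np : String) (fs : List String) :
    pvLastMatch np fs = fs.reverse.find? (fun f => pvNorm f == np) := by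
  induction fs using List.reverseRecOn with
  | nil => rfl
  | append_singleton l x ih =>
    simp only [pvLastMatch, List.foldl_append, List.foldl_cons, List.foldl_nil,
      List.reverse_append, List.reverse_cons, List.reverse_nil, List.nil_append] at *
    cases h : (pvNorm x == np) with
    | true => simp [h]
    | false => simpa [h] using ih

-- find? from the back = find? from the front when all hits are the same value
theorem pvFind_reverse_eq_find_of_unique {α : Type} (p : α → Bool) (l : List α)
    (h : ∀ a ∈ l, ∀ b ∈ l, p a = true → p b = true → a = b) :
    l.reverse.find? p = l.find? p := by
  induction l with
  | nil => rfl
  | cons x xs ih =>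
    simp only [List.reverse_cons]
    by_cases hx : p x = true
    · rw [List.find?_cons_of_pos hx, List.find?_append]
      cases hf : xs.reverse.find? p with
      | none => simp [hx]
      | some y =>
        have hy : p y = true := List.find?_some hf
        have hmem : y ∈ xs := List.mem_reverse.mp (List.mem_of_find?_eq_some hf)
        have := h y (by simp [hmem]) x (by simp) hy hx
        simp [this]
    · rw [List.find?_cons_of_neg hx, List.find?_append]
      have h1 : [x].find? p = none := by simp [hx]
      rw [h1, Option.or_none]
      exact ih (fun a ha b hb hpa hpb => h a (by simp [ha]) b (by simp [hb]) hpa hpb)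

-- uniqueness of a matching field value, extracted from Pre_
theorem pvUnique_of_pre (fs ps : List String) (hpre : Pre_detect_dbf_field_name fs ps)
    (q : String) (hq : q ∈ ps) :
    ∀ a ∈ fs, ∀ b ∈ fs, (pvNorm a == pvNorm q) = true → (pvNorm b == pvNorm q) = true →
      a = b := by
  intro a ha b hb hpa hpb
  have hna : pvNorm a = pvNorm q := by simpa using hpa
  have hnb : pvNorm b = pvNorm q := by simpa using hpb
  by_cases hab : a = b
  · exact hab
  · have hsym : Symmetric
        (fun f g => pvNorm f = pvNorm g → pvNorm f ∈ ps.map pvNorm → f = g) := by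
      intro f g hfg heq hmemg
      exact (hfg heq.symm (heq ▸ hmemg)).symm
    have := List.Pairwise.forall hsym hpre ha hb hab
    exact this (by rw [hna, hnb]) (by rw [hna]; exact List.mem_map_of_mem hq)

theorem pvLoopA_eq_pvSpec (fs : List String) (ps : List String)
    (h : ∀ q ∈ ps, ∀ a ∈ fs, ∀ b ∈ fs,
      (pvNorm a == pvNorm q) = true → (pvNorm b == pvNorm q) = true → a = b) :
    pvLoopA (fs.foldl (fun d name => d.insert (pvNorm name) name) PySem.Dict.empty) ps
      = pvSpec fs ps := by
  induction ps with
  | nil => rfl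
  | cons p rest ih =>
    simp only [pvLoopA, pvSpec]
    rw [PySem.Dict.contains_eq_isSome_get?, pvDict_get_eq_lastMatch,
      pvLastMatch_eq_find_reverse,
      pvFind_reverse_eq_find_of_unique _ _ (h p (by simp))]
    cases hf : fs.find? (fun f => pvNorm f == pvNorm p) with
    | some f => simp
    | none => simpa using ih (fun q hq => h q (by simp [hq]))

-- ---- B side ----

-- the rank dict built with setdefault looks up the FIRST index of a normalized candidate
theorem pvRank_get (ps : List String) (k : String) : ∀ (i : Int) (d : PySem.Dict String Int),
    ((PySem.List.enumerate ps i).foldl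
        (fun d q => d.setdefault (pvNorm q.2) q.1) d).get? k
      = (d.get? k).or ((PySem.List.index? (ps.map pvNorm) k).map (fun j : Nat => (j : Int) + i)) := by
  induction ps with
  | nil => intro i d; simp [PySem.List.enumerate_nil, PySem.List.index?_eq_idxOf?]
  | cons p rest ih =>
    intro i d
    rw [PySem.List.enumerate_cons, List.foldl_cons, ih (i + 1)]
    by_cases hk : k = pvNorm p
    · subst hk
      rw [PySem.Dict.get?_setdefault_self, List.map_cons, PySem.List.index?_cons_self]
      cases hd : d.get? (pvNorm p) <;> simp
    · rw [PySem.Dict.get?_setdefault_of_ne _ _ hk, List.map_cons,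
        PySem.List.index?_cons_of_ne _ (Ne.symm hk)]
      cases hd : d.get? k with
      | some v => simp
      | none =>
        cases hj : PySem.List.index? (rest.map pvNorm) k with
        | none => simp
        | some j =>
          simp only [Option.map_some, Option.none_or]
          congr 1
          push_cast
          ring

theorem pvFoldB_nil_targets (fs : List String) (st : Int × Option String)
    (rank : PySem.Dict String Int) (hrank : ∀ k, rank.get? k = none) :
    fs.foldl (pvStepB rank) st = st := by
  induction fs generalizing st with
  | nil => rfl
  | cons x xs ih =>
    simp only [List.foldl_cons, pvStepB, hrank]
    exact ih st

-- a rank dict whose entries come from index? (via pvRank_get) never holds a negative rank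
theorem pvFoldB_rank_zero (ts : List String) (fs : List String) (b : Option String)
    (rank : PySem.Dict String Int)
    (hrank : ∀ k, rank.get? k = (PySem.List.index? ts k).map (fun j : Nat => (j : Int))) :
    fs.foldl (pvStepB rank) (0, b) = (0, b) := by
  induction fs with
  | nil => rfl
  | cons x xs ih =>
    simp only [List.foldl_cons, pvStepB, hrank]
    cases hr : PySem.List.index? ts (pvNorm x) with
    | some r =>
      simp only [Option.map_some]
      rw [if_neg (by omega)]
      exact ih
    | none => exact ih

-- once a field matches the head candidate, B locks rank 0 on the FIRST such field
theorem pvFoldB_head_match (t : String) (ts : List String) (fs : List String)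
    (rank : PySem.Dict String Int)
    (hrank : ∀ k, rank.get? k = (PySem.List.index? (t :: ts) k).map (fun j : Nat => (j : Int)))
    (hex : ∃ f ∈ fs, pvNorm f = t) (st : Int × Option String) (hk : 1 ≤ st.1) :
    fs.foldl (pvStepB rank) st = (0, fs.find? (fun f => pvNorm f == t)) := by
  induction fs generalizing st with
  | nil => exact absurd hex (by simp)
  | cons x xs ih =>
    simp only [List.foldl_cons]
    by_cases hx : pvNorm x = t
    · have hstep : pvStepB rank st x = (0, some x) := by
        simp only [pvStepB, hrank, hx, PySem.List.index?_cons_self, Option.map_some,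
          Int.natCast_zero]
        rw [if_pos (by omega)]
      rw [hstep, pvFoldB_rank_zero (t :: ts) xs (some x) rank hrank,
        List.find?_cons_of_pos (by simp [hx])]
    · have hex' : ∃ f ∈ xs, pvNorm f = t := by
        rcases hex with ⟨f, hf, hnf⟩
        rcases List.mem_cons.mp hf with rfl | hf'
        · exact absurd hnf hx
        · exact ⟨f, hf', hnf⟩
      have hk' : 1 ≤ (pvStepB rank st x).1 := by
        simp only [pvStepB, hrank, PySem.List.index?_cons_of_ne ts (Ne.symm hx)]
        cases hr : PySem.List.index? ts (pvNorm x) with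
        | some r =>
          simp only [Option.map_some]
          split_ifs <;> [omega; exact hk]
        | none => simpa using hk
      rw [ih hex' _ hk', List.find?_cons_of_neg (by simpa using hx)]

-- no field matches the head candidate: the fold tracks the tail fold with rank shifted by one
theorem pvFoldB_head_miss (t : String) (ts : List String) (fs : List String)
    (rank rank' : PySem.Dict String Int)
    (hrank : ∀ k, rank.get? k = (PySem.List.index? (t :: ts) k).map (fun j : Nat => (j : Int)))
    (hrank' : ∀ k, rank'.get? k = (PySem.List.index? ts k).map (fun j : Nat => (j : Int)))
    (hm : ∀ f ∈ fs, pvNorm f ≠ t) (k : Int) (b : Option String) :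
    fs.foldl (pvStepB rank) (k + 1, b)
      = ((fs.foldl (pvStepB rank') (k, b)).1 + 1, (fs.foldl (pvStepB rank') (k, b)).2) := by
  induction fs generalizing k b with
  | nil => rfl
  | cons x xs ih =>
    have hx : pvNorm x ≠ t := hm x (by simp)
    have hm' : ∀ f ∈ xs, pvNorm f ≠ t := fun f hf => hm f (by simp [hf])
    simp only [List.foldl_cons]
    have hstep : pvStepB rank (k + 1, b) x
        = ((pvStepB rank' (k, b) x).1 + 1, (pvStepB rank' (k, b) x).2) := by
      simp only [pvStepB, hrank, hrank', PySem.List.index?_cons_of_ne ts (Ne.symm hx)]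
      cases hr : PySem.List.index? ts (pvNorm x) with
      | some r =>
        simp only [Option.map_some]
        by_cases hlt : (r : Int) < k
        · rw [if_pos (by push_cast; omega), if_pos hlt]
          simp only [Prod.mk.injEq]
          constructor
          · push_cast; ring
          · trivial
        · rw [if_neg (by push_cast; omega), if_neg hlt]
      | none => rfl
    rw [hstep]
    cases hs : pvStepB rank' (k, b) x with
    | mk k' b' => exact ih hm' k' b'

theorem pvAlt_eq_pvSpec (ps : List String) (fs : List String) :
    detect_dbf_field_name_alt fs ps = pvSpec fs ps := by
  induction ps generalizing fs with
  | nil =>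
    simp only [detect_dbf_field_name_alt]
    rw [pvFoldB_nil_targets fs _ _ (fun k => by
      rw [pvRank_get [] k 0 PySem.Dict.empty]
      simp [PySem.Dict.get?_empty, PySem.List.index?_eq_idxOf?])]
    rfl
  | cons p rest ih =>
    have hrank : ∀ k, ((PySem.List.enumerate (p :: rest) 0).foldl
        (fun d q => d.setdefault (pvNorm q.2) q.1) PySem.Dict.empty).get? k
        = (PySem.List.index? ((p :: rest).map pvNorm) k).map (fun j : Nat => (j : Int)) := by
      intro k
      rw [pvRank_get (p :: rest) k 0 PySem.Dict.empty]
      simp [PySem.Dict.get?_empty]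
    simp only [detect_dbf_field_name_alt, pvSpec]
    by_cases hex : ∃ f ∈ fs, pvNorm f = pvNorm p
    · rw [pvFoldB_head_match (pvNorm p) (rest.map pvNorm) fs _
        (by simpa only [List.map_cons] using hrank) hex _ (by simp)]
      rcases hex with ⟨f, hf, hnf⟩
      cases hfind : fs.find? (fun f => pvNorm f == pvNorm p) with
      | some g => simp
      | none =>
        exfalso
        have := List.find?_eq_none.mp hfind f hf
        simp [hnf] at this
    · have hm : ∀ f ∈ fs, pvNorm f ≠ pvNorm p := by
        intro f hf hc; exact hex ⟨f, hf, hc⟩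
      have hfind : fs.find? (fun f => pvNorm f == pvNorm p) = none := by
        rw [List.find?_eq_none]
        intro f hf
        simpa using hm f hf
      have hlen : ((p :: rest).length : Int) = (rest.length : Int) + 1 := by
        simp
      rw [hfind, hlen, pvFoldB_head_miss (pvNorm p) (rest.map pvNorm) fs _ _
        (by simpa only [List.map_cons] using hrank)
        (fun k => by
          rw [pvRank_get rest k 0 PySem.Dict.empty]
          simp [PySem.Dict.get?_empty])
        hm (rest.length : Int) none]
      exact ih fs

-- ===== VERDICT (by name: the statement is the Claim_ definition above) =====
theorem detect_dbf_field_name_spec : Claim_equal_detect_dbf_field_name := by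
  intro fs ps _ hpre
  unfold Spec_detect_dbf_field_name detect_dbf_field_name
  rw [pvAlt_eq_pvSpec]
  split_ifs with h
  · rcases h with h | h
    · rw [h, pvSpec_nil_fields]
    · rw [h]; rfl
  · exact pvLoopA_eq_pvSpec fs ps (fun q hq => pvUnique_of_pre fs ps hpre q hq)
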